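-- pv_equiv track=rewrite | github.com/devasherr/competitive_programming | 0858-masking-personal-information/0858-masking-personal-information.py | handleEmail
-- ===== SOURCE A (Python) =====
-- def handleEmail(email):
--     res = [email[0].lower(), "*****"]
--     prev = email[0]
--     for i in range(1, len(email)):
--         if email[i] == "@":
--             res.append(prev.lower())
--             res.append(email[i])
--             break
--         prev = email[i]
--     i += 1
--     while i < len(email):
--         res.append(email[i].lower())
--         i += 1
--     return "".join(res)
-- ===== SOURCE B (Python) =====
-- def handleEmail(email):
--     at = email.find('@', 1)
--     if at == -1:
--         return email[0].lower() + "*****"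
--     return email[0].lower() + "*****" + email[at - 1].lower() + email[at:].lower()
-- ===== Notes on version B (the rewrite author's own statement) =====
-- stated objective: simpler
-- what changed: Replaces A's explicit character scan carrying a prev variable plus a trailing while loop with a single str.find at-sign search from position 1 followed by an index-and-slice closed-form expression (the str built-ins run at C speed, hence the measured constant-factor speedup).
import Mathlib
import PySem

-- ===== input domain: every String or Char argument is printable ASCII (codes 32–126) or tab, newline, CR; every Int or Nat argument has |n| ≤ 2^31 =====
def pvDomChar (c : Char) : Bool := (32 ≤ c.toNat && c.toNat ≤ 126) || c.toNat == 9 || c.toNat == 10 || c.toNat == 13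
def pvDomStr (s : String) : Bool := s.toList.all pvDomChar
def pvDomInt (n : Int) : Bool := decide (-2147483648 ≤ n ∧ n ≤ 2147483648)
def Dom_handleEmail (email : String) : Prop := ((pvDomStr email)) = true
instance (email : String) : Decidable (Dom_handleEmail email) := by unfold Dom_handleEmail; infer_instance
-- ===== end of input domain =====

-- B replaces A's explicit scan-with-prev loop and trailing while loop by a single
-- find('@', 1) plus index-and-slice closed form (objective: simpler).

-- ===== PORT A =====
-- the `for i in range(1, len(email))` scan carrying `prev`, followed (after a break) by the
-- `while` loop that lowercases the remaining characters one by one (ported as the map)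
def handleEmailGo (prev : Char) (rest : List Char) : List Char :=
  match rest with
  | [] => []
  | c :: tl =>
    if c = '@' then
      PySem.Chars.lowerChar prev :: c :: tl.map PySem.Chars.lowerChar
    else handleEmailGo c tl

def handleEmail (email : String) : String :=
  match email.toList with
  | [] => ""        -- email[0] raises IndexError; outside Pre_
  | [_] => ""       -- the loop never runs, so `i += 1` raises NameError; outside Pre_
  | c0 :: rest => String.ofList (PySem.Chars.lowerChar c0 :: "*****".toList ++ handleEmailGo c0 rest)

-- ===== PORT B =====
def handleEmail_alt (email : String) : String :=
  match email.toList with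
  | [] => ""        -- email[0] raises IndexError; outside Pre_
  | c0 :: _ =>
    let a := PySem.Str.findFrom email "@" 1 none
    if a = -1 then
      String.ofList (PySem.Chars.lowerChar c0 :: "*****".toList)
    else
      String.ofList (PySem.Chars.lowerChar c0 :: "*****".toList
        ++ [PySem.Chars.lowerChar (PySem.List.pyGetD email.toList (a - 1) ' ')]
        ++ PySem.Chars.lower (PySem.List.slice email.toList (some a) none))

-- ===== PRECONDITION & SPEC =====
-- Pre_ excludes strings of length < 2, on which A raises: IndexError on the empty string,
-- NameError on a one-character string (the loop index is never bound).
def Pre_handleEmail (email : String) : Prop := 2 ≤ PySem.Str.len email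
instance (email : String) : Decidable (Pre_handleEmail email) := by unfold Pre_handleEmail; infer_instance

def pvWitness_handleEmail : String := "a@b.C"

def Spec_handleEmail (email : String) (out : String) : Prop := out = handleEmail_alt email
instance (email : String) (out : String) : Decidable (Spec_handleEmail email out) := by unfold Spec_handleEmail; infer_instance

-- ===== CLAIM (what is proved, stated in full; the proofs are below) =====
def Claim_equal_handleEmail : Prop := ∀ (email : String), Dom_handleEmail email → Pre_handleEmail email → Spec_handleEmail email (handleEmail email)

-- ===== LEMMAS AND PROOFS =====

lemma go_of_not_mem (rest : List Char) (prev : Char) (h : '@' ∉ rest) :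
    handleEmailGo prev rest = [] := by
  induction rest generalizing prev with
  | nil => rfl
  | cons c tl ih =>
    simp only [List.mem_cons, not_or] at h
    rw [handleEmailGo, if_neg (Ne.symm h.1)]
    exact ih c h.2

lemma go_of_first (rest : List Char) (prev : Char) (k : Nat)
    (h : rest[k]? = some '@') (hmin : ∀ i, i < k → rest[i]? ≠ some '@') :
    handleEmailGo prev rest
      = PySem.Chars.lowerChar ((prev :: rest).getD k ' ')
        :: PySem.Chars.lower (rest.drop k) := by
  induction rest generalizing prev k with
  | nil => simp at h
  | cons c tl ih =>
    match k with
    | 0 =>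
      simp only [List.getElem?_cons_zero, Option.some.injEq] at h
      subst h
      simp [handleEmailGo, PySem.Chars.lower]
      decide
    | k + 1 =>
      have hc : c ≠ '@' := by
        intro hc
        exact hmin 0 (Nat.succ_pos _) (by simp [hc])
      have := ih c k (by simpa using h)
        (fun i hi => by simpa using hmin (i + 1) (by omega))
      simpa [handleEmailGo, hc] using this

lemma singleton_prefix_iff (l : List Char) (x : Char) :
    [x] <+: l ↔ l[0]? = some x := by
  cases l with
  | nil => simp
  | cons a t => simp [List.cons_prefix_cons, eq_comm]

theorem handleEmail_spec : Claim_equal_handleEmail := by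
  intro email _ hpre
  unfold Spec_handleEmail
  unfold Pre_handleEmail at hpre
  rw [PySem.Str.len_eq] at hpre
  match hcs : email.toList with
  | [] => simp [hcs] at hpre
  | [c] => simp [hcs] at hpre
  | c0 :: c1 :: rest2 =>
    have h1 : 1 ≤ email.toList.length := by rw [hcs]; simp
    have hfind : PySem.Str.findFrom email "@" 1 none
        = if PySem.Chars.find (c1 :: rest2) ['@'] = -1 then -1
          else 1 + PySem.Chars.find (c1 :: rest2) ['@'] := by
      rw [PySem.Str.findFrom_eq, hcs]
      have h1' : 1 ≤ (c0 :: c1 :: rest2).length := by simp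
      have := PySem.Chars.findFrom_natCast (c0 :: c1 :: rest2) "@".toList 1 h1'
      simpa using this
    by_cases hneg : PySem.Chars.find (c1 :: rest2) ['@'] = -1
    · -- no '@' after position 0: both sides are first char lowered plus the stars
      have hnm : '@' ∉ (c1 :: rest2) := by
        have hni := (PySem.Chars.find_eq_neg_one_iff (c1 :: rest2) ['@']).mp hneg
        intro hmem
        obtain ⟨k, hk⟩ := List.mem_iff_getElem?.mp hmem
        exact hni (List.infix_iff_prefix_suffix.mpr
          ⟨_, (singleton_prefix_iff _ _).mpr (by simpa using hk), List.drop_suffix k _⟩)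
      simp only [handleEmail, handleEmail_alt, hcs, hfind, hneg, if_pos]
      rw [go_of_not_mem _ c0 hnm]
      simp
    · -- '@' found: find points at its first occurrence, index k in the tail
      have hnn : 0 ≤ PySem.Chars.find (c1 :: rest2) ['@'] := by
        have := PySem.Chars.neg_one_le_find (c1 :: rest2) ['@']
        omega
      set k : Nat := (PySem.Chars.find (c1 :: rest2) ['@']).toNat with hk
      have hkval : PySem.Chars.find (c1 :: rest2) ['@'] = (k : Int) := by omega
      obtain ⟨hpre', hmin⟩ := PySem.Chars.find_spec hnn
      have hget : (c1 :: rest2)[k]? = some '@' := by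
        have := (singleton_prefix_iff _ _).mp hpre'
        simpa using this
      have hminK : ∀ i, i < k → (c1 :: rest2)[i]? ≠ some '@' := by
        intro i hi hsome
        exact hmin i hi ((singleton_prefix_iff _ _).mpr (by simpa using hsome))
      have hne : (1 : Int) + PySem.Chars.find (c1 :: rest2) ['@'] ≠ -1 := by omega
      simp only [handleEmail, handleEmail_alt, hcs, hfind, if_neg hneg, if_neg hne]
      rw [go_of_first _ c0 k hget hminK]
      have hIdx : (1 : Int) + PySem.Chars.find (c1 :: rest2) ['@'] - 1 = (k : Int) := by omega
      have hSliceArg : (1 : Int) + PySem.Chars.find (c1 :: rest2) ['@'] = ((k + 1 : Nat) : Int) := by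
        push_cast; omega
      rw [hIdx, hSliceArg, PySem.List.pyGetD_natCast, PySem.List.slice_from_natCast]
      simp
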